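-- pv_equiv track=rewrite | github.com/dongkam5/python_algo | BOJ/12904_1.py | check
-- ===== SOURCE A (Python) =====
-- def check(S,T,is_reverse,len_S,len_T):
--     ans=0
--     if len_S==len_T:
--         if is_reverse==True:
--             S.reverse()
--         S=''.join(S)
--         T=''.join(T)
--         if S==T:
--             return 1
--         else:
--             return 0
--     else:
--         if is_reverse:
--             ans+=check(['A']+S,T,is_reverse,len_S+1,len_T)
--             ans+=check(S+['B'],T,not is_reverse,len_S+1,len_T)
--         else:
--             ans+=check(S+['A'],T,is_reverse,len_S+1,len_T)
--             ans+=check(['B']+S,T,not is_reverse,len_S+1,len_T)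
--     return ans
-- ===== SOURCE B (Python) =====
-- def check(S, T, is_reverse, len_S, len_T):
--     # Reduce the target backwards: each forward operation appends 'A' to the
--     # effective string, or list-reverses it and appends 'B', so the last
--     # character of the target dictates the (unique) last operation.  The
--     # original S-block is only ever list-reversed as a whole, so we keep its
--     # two orientations aside and only strip the single appended characters.
--     k = len_T - len_S
--     t = ''.join(T)
--     c0 = ''.join(S)
--     c1 = ''.join(reversed(S))
--     if len(t) != len(c0) + k:
--         return 0
--     p = False
--     for _ in range(k):
--         if t.endswith('A'):
--             t = t[:-1]
--         elif t.endswith('B'):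
--             t = t[:-1][::-1]
--             p = not p
--         else:
--             return 0
--     base = c1 if (bool(is_reverse) != p) else c0
--     if p:
--         base = base[::-1]
--     return 1 if t == base else 0
-- ===== Notes on version B (the rewrite author's own statement) =====
-- stated objective: alternative
-- what changed: A enumerates all 2^(len_T-len_S) operation sequences by forward branching recursion; B instead reduces the joined target backwards deterministically (the last character forces the last operation: strip 'A', or strip 'B' and reverse, tracking the parity of reversals and the two orientations of the original S block) after an O(1) length check.
import Mathlib
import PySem

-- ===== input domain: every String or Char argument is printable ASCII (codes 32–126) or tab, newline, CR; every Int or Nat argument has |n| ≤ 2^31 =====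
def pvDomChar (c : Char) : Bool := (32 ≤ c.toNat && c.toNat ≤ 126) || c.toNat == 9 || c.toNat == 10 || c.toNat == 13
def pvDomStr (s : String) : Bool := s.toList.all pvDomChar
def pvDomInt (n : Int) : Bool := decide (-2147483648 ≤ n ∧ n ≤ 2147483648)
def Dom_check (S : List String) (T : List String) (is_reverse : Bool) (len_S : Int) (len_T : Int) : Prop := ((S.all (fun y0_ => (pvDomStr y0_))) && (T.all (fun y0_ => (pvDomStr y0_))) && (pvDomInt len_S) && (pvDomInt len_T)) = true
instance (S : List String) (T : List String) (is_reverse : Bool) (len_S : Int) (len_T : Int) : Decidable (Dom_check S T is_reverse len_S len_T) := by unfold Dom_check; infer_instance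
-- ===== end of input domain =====

-- B replaces A's exhaustive forward branching recursion by one deterministic
-- backward reduction of the target (objective: alternative).
-- Note: A reverses the caller's list S in place in its base case; the
-- equivalence proved here is about the return value only.

-- ===== PORT A =====
-- A's recursion, with fuel = len_T - len_S (exact recursion depth whenever
-- len_S ≤ len_T, which Pre_check guarantees; A never returns otherwise).
def checkAux : Nat → List String → List String → Bool → Int → Int → Int
  | fuel, S, T, is_reverse, len_S, len_T =>
    if len_S = len_T then
      let S1 := if is_reverse = true then S.reverse else S
      let Sj := PySem.Str.join "" S1
      let Tj := PySem.Str.join "" T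
      if Sj = Tj then 1 else 0
    else
      match fuel with
      | 0 => 0  -- unreachable under Pre_check
      | f + 1 =>
        if is_reverse then
          checkAux f ("A" :: S) T is_reverse (len_S + 1) len_T
            + checkAux f (S ++ ["B"]) T (!is_reverse) (len_S + 1) len_T
        else
          checkAux f (S ++ ["A"]) T is_reverse (len_S + 1) len_T
            + checkAux f ("B" :: S) T (!is_reverse) (len_S + 1) len_T

def check (S : List String) (T : List String) (is_reverse : Bool) (len_S : Int) (len_T : Int) : Int :=
  checkAux (len_T - len_S).toNat S T is_reverse len_S len_T

-- ===== PORT B =====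
-- Source B's backward loop: k times strip the last character of the target
-- ('B' additionally string-reverses and toggles p); `none` is the early
-- `return 0` of Source B.
def altLoop : Nat → String → Bool → Option (String × Bool)
  | 0, t, p => some (t, p)
  | n + 1, t, p =>
    if PySem.Str.endswith t "A" then
      altLoop n (PySem.Str.slice t none (some (-1))) p
    else if PySem.Str.endswith t "B" then
      -- t[:-1][::-1]; exact by PySem.Str.slice?_none_none_neg_one
      altLoop n (String.ofList (PySem.Str.slice t none (some (-1))).toList.reverse) (!p)
    else
      none

def check_alt (S : List String) (T : List String) (is_reverse : Bool) (len_S : Int) (len_T : Int) : Int :=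
  let k := len_T - len_S
  let t := PySem.Str.join "" T
  let c0 := PySem.Str.join "" S
  let c1 := PySem.Str.join "" S.reverse
  if PySem.Str.len t ≠ PySem.Str.len c0 + k then 0
  else
    match altLoop k.toNat t false with
    | none => 0
    | some (u, p) =>
      let base := if is_reverse ≠ p then c1 else c0
      let base1 := if p then String.ofList base.toList.reverse else base
      if u = base1 then 1 else 0

-- ===== PRECONDITION & SPEC =====
-- Pre_check excludes exactly len_S > len_T, where A's recursion never reaches
-- its base case (len_S only grows): A raises RecursionError instead of
-- returning a value there.
def Pre_check (S : List String) (T : List String) (is_reverse : Bool) (len_S : Int) (len_T : Int) : Prop :=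
  0 ≤ len_T - len_S
instance (S : List String) (T : List String) (is_reverse : Bool) (len_S : Int) (len_T : Int) : Decidable (Pre_check S T is_reverse len_S len_T) := by unfold Pre_check; infer_instance

def pvWitness_check : List String × List String × Bool × Int × Int := (["A"], ["A", "A"], false, 1, 2)

def Spec_check (S : List String) (T : List String) (is_reverse : Bool) (len_S : Int) (len_T : Int) (out : Int) : Prop := out = check_alt S T is_reverse len_S len_T
instance (S : List String) (T : List String) (is_reverse : Bool) (len_S : Int) (len_T : Int) (out : Int) : Decidable (Spec_check S T is_reverse len_S len_T out) := by unfold Spec_check; infer_instance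

-- ===== CLAIM (what is proved, stated in full; the proofs are below) =====
def Claim_equal_check : Prop := ∀ (S : List String) (T : List String) (is_reverse : Bool) (len_S : Int) (len_T : Int), Dom_check S T is_reverse len_S len_T → Pre_check S T is_reverse len_S len_T → Spec_check S T is_reverse len_S len_T (check S T is_reverse len_S len_T)


-- ===== LEMMAS AND PROOFS =====

-- join with the empty separator is concatenation
theorem chars_join_nil_eq_flatten : ∀ ps : List (List Char), PySem.Chars.join [] ps = ps.flatten
  | [] => by simp [PySem.Chars.join_nil]
  | [p] => by simp [PySem.Chars.join_singleton]
  | p :: q :: r => by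
      rw [PySem.Chars.join_cons_cons, chars_join_nil_eq_flatten (q :: r)]; simp

-- chars of ''.join(L)
def jn (L : List String) : List Char := (L.map String.toList).flatten

theorem toList_join_nil (L : List String) : (PySem.Str.join "" L).toList = jn L := by
  rw [PySem.Str.toList_join]
  simpa [jn] using chars_join_nil_eq_flatten (L.map String.toList)

-- the effective joined string of a state (S, b)
def JA (S : List String) (b : Bool) : List Char := jn (if b then S.reverse else S)

theorem len_JA (S : List String) (b : Bool) : (JA S b).length = (jn S).length := by
  cases b <;> simp [JA, jn]

-- how one operation changes the effective string (tail forms) …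
theorem ja_snocA (S : List String) : JA (S ++ ["A"]) false = JA S false ++ ['A'] := by
  simp [JA, jn]
theorem ja_consA (S : List String) : JA ("A" :: S) true = JA S true ++ ['A'] := by
  simp [JA, jn]
theorem ja_consB (S : List String) : JA ("B" :: S) true = JA S true ++ ['B'] := by
  simp [JA, jn]
theorem ja_snocB (S : List String) : JA (S ++ ["B"]) false = JA S false ++ ['B'] := by
  simp [JA, jn]
-- … and its list-reversed twin (head forms)
theorem jb_consA (S : List String) : JA ("A" :: S) false = 'A' :: JA S false := by
  simp [JA, jn]
theorem jb_snocA (S : List String) : JA (S ++ ["A"]) true = 'A' :: JA S true := by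
  simp [JA, jn]
theorem jb_consB (S : List String) : JA ("B" :: S) false = 'B' :: JA S false := by
  simp [JA, jn]
theorem jb_snocB (S : List String) : JA (S ++ ["B"]) true = 'B' :: JA S true := by
  simp [JA, jn]

-- the number of op-sequences of length k from state (S, b) whose final
-- effective string (g = false), resp. its list-reversed-join twin
-- (g = true), equals t — branching exactly as the Python A branches
def Cnt (g : Bool) : Nat → List String → Bool → List Char → Int
  | 0, S, b, t => if JA S (Bool.xor b g) = t then 1 else 0
  | k + 1, S, b, t =>
    if b then
      Cnt g k ("A" :: S) b t + Cnt g k (S ++ ["B"]) (!b) t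
    else
      Cnt g k (S ++ ["A"]) b t + Cnt g k ("B" :: S) (!b) t

-- indicator bookkeeping for a pair of snoc-equations
theorem ind_snoc (x y t : List Char) :
    ((if x ++ ['A'] = t then (1 : Int) else 0) + (if y ++ ['B'] = t then 1 else 0))
      = match t.getLast? with
        | some c =>
            if c = 'A' then (if x = t.dropLast then (1 : Int) else 0)
            else if c = 'B' then (if y = t.dropLast then 1 else 0)
            else 0
        | none => 0 := by
  induction t using List.reverseRecOn with
  | nil => simp
  | append_singleton u c _ =>
    simp only [List.getLast?_concat, List.dropLast_concat, List.append_singleton_inj]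
    by_cases hA : c = 'A'
    · subst hA; simp
    · by_cases hB : c = 'B'
      · subst hB; simp
      · have h1 : ¬('A' = c) := fun h => hA h.symm
        have h2 : ¬('B' = c) := fun h => hB h.symm
        simp [hA, hB, h1, h2]

-- indicator bookkeeping for a pair of cons-equations
theorem ind_cons (x y t : List Char) :
    ((if 'A' :: x = t then (1 : Int) else 0) + (if 'B' :: y = t then 1 else 0))
      = match t.head? with
        | some c =>
            if c = 'A' then (if x = t.tail then (1 : Int) else 0)
            else if c = 'B' then (if y = t.tail then 1 else 0)
            else 0
        | none => 0 := by
  cases t with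
  | nil => simp
  | cons c u =>
    simp only [List.head?_cons, List.tail_cons, List.cons.injEq]
    by_cases hA : c = 'A'
    · subst hA; simp
    · by_cases hB : c = 'B'
      · subst hB; simp
      · have h1 : ¬('A' = c) := fun h => hA h.symm
        have h2 : ¬('B' = c) := fun h => hB h.symm
        simp [hA, hB, h1, h2]

-- last-operation (resp. first-character) characterisation of Cnt
theorem cnt_peel : ∀ (k : Nat),
    (∀ (S : List String) (b : Bool) (t : List Char),
      Cnt false (k + 1) S b t =
        match t.getLast? with
        | some c =>
            if c = 'A' then Cnt false k S b t.dropLast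
            else if c = 'B' then Cnt true k S b t.dropLast
            else 0
        | none => 0)
    ∧ (∀ (S : List String) (b : Bool) (t : List Char),
      Cnt true (k + 1) S b t =
        match t.head? with
        | some c =>
            if c = 'A' then Cnt true k S b t.tail
            else if c = 'B' then Cnt false k S b t.tail
            else 0
        | none => 0) := by
  intro k
  induction k with
  | zero =>
    constructor
    · intro S b t
      cases b
      · rw [show Cnt false 1 S false t
            = ((if JA (S ++ ["A"]) false = t then (1 : Int) else 0)
                + (if JA ("B" :: S) true = t then 1 else 0)) from rfl,
          ja_snocA, ja_consB, ind_snoc]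
        exact rfl
      · rw [show Cnt false 1 S true t
            = ((if JA ("A" :: S) true = t then (1 : Int) else 0)
                + (if JA (S ++ ["B"]) false = t then 1 else 0)) from rfl,
          ja_consA, ja_snocB, ind_snoc]
        exact rfl
    · intro S b t
      cases b
      · rw [show Cnt true 1 S false t
            = ((if JA (S ++ ["A"]) true = t then (1 : Int) else 0)
                + (if JA ("B" :: S) false = t then 1 else 0)) from rfl,
          jb_snocA, jb_consB, ind_cons]
        exact rfl
      · rw [show Cnt true 1 S true t
            = ((if JA ("A" :: S) false = t then (1 : Int) else 0)
                + (if JA (S ++ ["B"]) true = t then 1 else 0)) from rfl,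
          jb_consA, jb_snocB, ind_cons]
        exact rfl
  | succ k ih =>
    obtain ⟨ihF, ihG⟩ := ih
    constructor
    · intro S b t
      cases b
      · rw [show Cnt false (k + 1 + 1) S false t
            = Cnt false (k + 1) (S ++ ["A"]) false t + Cnt false (k + 1) ("B" :: S) true t from rfl,
          ihF, ihF]
        cases h : t.getLast? with
        | none => simp
        | some c =>
          by_cases hA : c = 'A'
          · subst hA; simp only [if_pos rfl]
            rfl
          · by_cases hB : c = 'B'
            · subst hB; simp only [if_neg hA, if_pos rfl]
              rfl
            · simp [hA, hB]
      · rw [show Cnt false (k + 1 + 1) S true t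
            = Cnt false (k + 1) ("A" :: S) true t + Cnt false (k + 1) (S ++ ["B"]) false t from rfl,
          ihF, ihF]
        cases h : t.getLast? with
        | none => simp
        | some c =>
          by_cases hA : c = 'A'
          · subst hA; simp only [if_pos rfl]
            rfl
          · by_cases hB : c = 'B'
            · subst hB; simp only [if_neg hA, if_pos rfl]
              rfl
            · simp [hA, hB]
    · intro S b t
      cases b
      · rw [show Cnt true (k + 1 + 1) S false t
            = Cnt true (k + 1) (S ++ ["A"]) false t + Cnt true (k + 1) ("B" :: S) true t from rfl,
          ihG, ihG]
        cases h : t.head? with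
        | none => simp
        | some c =>
          by_cases hA : c = 'A'
          · subst hA; simp only [if_pos rfl]
            rfl
          · by_cases hB : c = 'B'
            · subst hB; simp only [if_neg hA, if_pos rfl]
              rfl
            · simp [hA, hB]
      · rw [show Cnt true (k + 1 + 1) S true t
            = Cnt true (k + 1) ("A" :: S) true t + Cnt true (k + 1) (S ++ ["B"]) false t from rfl,
          ihG, ihG]
        cases h : t.head? with
        | none => simp
        | some c =>
          by_cases hA : c = 'A'
          · subst hA; simp only [if_pos rfl]
            rfl
          · by_cases hB : c = 'B'
            · subst hB; simp only [if_neg hA, if_pos rfl]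
              rfl
            · simp [hA, hB]

-- if the length bookkeeping cannot work out, no op-sequence matches
theorem jn_snoc (S : List String) (x : String) : jn (S ++ [x]) = jn S ++ x.toList := by
  simp [jn]
theorem jn_cons (x : String) (S : List String) : jn (x :: S) = x.toList ++ jn S := by
  simp [jn]

theorem cnt_len_zero (g : Bool) : ∀ (k : Nat) (S : List String) (b : Bool) (t : List Char),
    t.length ≠ (jn S).length + k → Cnt g k S b t = 0 := by
  intro k
  induction k with
  | zero =>
    intro S b t h
    simp only [Cnt]
    rw [if_neg]
    intro contra
    exact h (by rw [← contra, len_JA]; omega)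
  | succ k ih =>
    intro S b t h
    have hA1 : ("A" : String).toList.length = 1 := rfl
    have hB1 : ("B" : String).toList.length = 1 := rfl
    cases b
    · rw [show Cnt g (k + 1) S false t
          = Cnt g k (S ++ ["A"]) false t + Cnt g k ("B" :: S) true t from rfl,
        ih _ _ _ (by rw [jn_snoc, List.length_append, hA1]; omega),
        ih _ _ _ (by rw [jn_cons, List.length_append, hB1]; omega)]
      simp
    · rw [show Cnt g (k + 1) S true t
          = Cnt g k ("A" :: S) true t + Cnt g k (S ++ ["B"]) false t from rfl,
        ih _ _ _ (by rw [jn_cons, List.length_append, hA1]; omega),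
        ih _ _ _ (by rw [jn_snoc, List.length_append, hB1]; omega)]
      simp

-- proof-side mirror of altLoop over List Char
def loopC : Nat → List Char → Bool → Option (List Char × Bool)
  | 0, t, p => some (t, p)
  | n + 1, t, p =>
    if t.getLast? = some 'A' then loopC n t.dropLast p
    else if t.getLast? = some 'B' then loopC n t.dropLast.reverse (!p)
    else none

theorem suffix_singleton_iff (c : Char) (l : List Char) : [c] <:+ l ↔ l.getLast? = some c := by
  induction l using List.reverseRecOn with
  | nil => simp
  | append_singleton u d _ =>
    simp only [List.getLast?_concat, Option.some_inj]
    constructor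
    · rintro ⟨w, hw⟩
      have := congrArg List.getLast? hw
      simpa [List.getLast?_concat] using this.symm
    · rintro rfl; exact ⟨u, rfl⟩

theorem endswith_A (s : String) : PySem.Str.endswith s "A" = true ↔ s.toList.getLast? = some 'A' := by
  rw [PySem.Str.endswith_eq, PySem.Chars.endswith_iff]
  exact suffix_singleton_iff 'A' s.toList

theorem endswith_B (s : String) : PySem.Str.endswith s "B" = true ↔ s.toList.getLast? = some 'B' := by
  rw [PySem.Str.endswith_eq, PySem.Chars.endswith_iff]
  exact suffix_singleton_iff 'B' s.toList

theorem altLoop_eq_loopC : ∀ (n : Nat) (s : String) (p : Bool),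
    altLoop n s p = (loopC n s.toList p).map (fun r => (String.ofList r.1, r.2)) := by
  intro n
  induction n with
  | zero => intro s p; simp [altLoop, loopC]
  | succ n ih =>
    intro s p
    simp only [altLoop, loopC]
    by_cases h1 : s.toList.getLast? = some 'A'
    · rw [if_pos ((endswith_A s).mpr h1), if_pos h1, ih, PySem.Str.slice_to_neg_one]
    · rw [if_neg (fun hh => h1 ((endswith_A s).mp hh)), if_neg h1]
      by_cases h2 : s.toList.getLast? = some 'B'
      · rw [if_pos ((endswith_B s).mpr h2), if_pos h2, ih]
        simp only [String.toList_ofList, PySem.Str.slice_to_neg_one]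
      · rw [if_neg (fun hh => h2 ((endswith_B s).mp hh)), if_neg h2]
        rfl

theorem reverse_tail_eq (t : List Char) : t.reverse.tail = t.dropLast.reverse := by
  induction t using List.reverseRecOn <;> simp

-- the backward loop computes exactly the forward count
theorem loop_cnt (S : List String) (b : Bool) : ∀ (k : Nat) (t : List Char) (p : Bool),
    (match loopC k t p with
     | none => (0 : Int)
     | some (u, q) =>
         if u = (if q then (JA S (Bool.xor b q)).reverse else JA S (Bool.xor b q)) then 1 else 0)
    = if p then Cnt true k S b t.reverse else Cnt false k S b t := by
  intro k
  induction k with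
  | zero =>
    intro t p
    cases p
    · simp only [loopC, Cnt, Bool.xor_false, Bool.false_eq_true, ite_false]
      by_cases hc : JA S b = t
      · rw [if_pos hc.symm, if_pos hc]
      · rw [if_neg (fun hh => hc hh.symm), if_neg hc]
    · simp only [loopC, Cnt, Bool.xor_true, ite_true]
      by_cases hc : JA S (!b) = t.reverse
      · rw [if_pos (by rw [hc, List.reverse_reverse]), if_pos hc]
      · rw [if_neg (fun hh => hc (by rw [hh, List.reverse_reverse])), if_neg hc]
  | succ k ih =>
    intro t p
    obtain ⟨pf, pg⟩ := cnt_peel k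
    simp only [loopC]
    by_cases h1 : t.getLast? = some 'A'
    · rw [if_pos h1, ih]
      cases p
      · simp only [Bool.false_eq_true, ite_false] at *
        rw [pf S b t, h1]
        simp
      · simp only [ite_true] at *
        rw [pg S b t.reverse]
        rw [List.head?_reverse, h1]
        simp [reverse_tail_eq]
    · rw [if_neg h1]
      by_cases h2 : t.getLast? = some 'B'
      · rw [if_pos h2, ih]
        cases p
        · simp only [Bool.not_false, ite_true, Bool.false_eq_true, ite_false]
          rw [List.reverse_reverse, pf S b t, h2]
          simp
        · simp only [Bool.not_true, Bool.false_eq_true, ite_false, ite_true]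
          rw [pg S b t.reverse, List.head?_reverse, h2]
          simp [reverse_tail_eq]
      · rw [if_neg h2]
        cases p
        · rw [pf S b t] at *
          cases h : t.getLast? with
          | none => simp [h]
          | some c =>
            have hA : ¬ c = 'A' := fun hh => h1 (by rw [h, hh])
            have hB : ¬ c = 'B' := fun hh => h2 (by rw [h, hh])
            simp [h, hA, hB]
        · rw [pg S b t.reverse, List.head?_reverse] at *
          cases h : t.getLast? with
          | none => simp [h]
          | some c =>
            have hA : ¬ c = 'A' := fun hh => h1 (by rw [h, hh])
            have hB : ¬ c = 'B' := fun hh => h2 (by rw [h, hh])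
            simp [h, hA, hB]

-- A's recursion counts op-sequences
theorem checkAux_eq_cnt (T : List String) : ∀ (fuel : Nat) (S : List String) (b : Bool) (lS lT : Int),
    lS + fuel = lT →
    checkAux fuel S T b lS lT = Cnt false fuel S b (PySem.Str.join "" T).toList := by
  intro fuel
  induction fuel with
  | zero =>
    intro S b lS lT h
    have heq : lS = lT := by omega
    simp only [checkAux, if_pos heq, Cnt, Bool.xor_false]
    by_cases hc : JA S b = (PySem.Str.join "" T).toList
    · rw [if_pos hc, if_pos]
      rw [← String.toList_inj, toList_join_nil]
      cases b <;> simpa [JA] using hc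
    · rw [if_neg hc, if_neg]
      intro hs
      apply hc
      rw [← String.toList_inj, toList_join_nil] at hs
      cases b <;> simpa [JA] using hs
  | succ f ihf =>
    intro S b lS lT h
    have hne : ¬ lS = lT := by push_cast at h; omega
    have h1 : (lS + 1) + (f : Int) = lT := by push_cast at h ⊢; omega
    cases b
    · simp only [checkAux, Cnt]
      rw [if_neg hne]
      simp only [Bool.false_eq_true, ite_false, Bool.not_false]
      rw [ihf _ _ _ _ h1, ihf _ _ _ _ h1]
    · simp only [checkAux, Cnt]
      rw [if_neg hne]
      simp only [ite_true, Bool.not_true]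
      rw [ihf _ _ _ _ h1, ihf _ _ _ _ h1]

-- B equals the count too
theorem ofList_eq_iff (u : List Char) (s : String) : String.ofList u = s ↔ u = s.toList := by
  rw [← String.toList_inj, String.toList_ofList]

theorem check_alt_eq_cnt (S T : List String) (b : Bool) (lS lT : Int) (h0 : 0 ≤ lT - lS) :
    check_alt S T b lS lT = Cnt false (lT - lS).toNat S b (PySem.Str.join "" T).toList := by
  unfold check_alt
  by_cases hlen : PySem.Str.len (PySem.Str.join "" T) ≠ PySem.Str.len (PySem.Str.join "" S) + (lT - lS)
  · rw [if_pos hlen, cnt_len_zero false _ S b _ ?_]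
    rw [PySem.Str.len_eq, PySem.Str.len_eq, toList_join_nil, toList_join_nil] at hlen
    rw [toList_join_nil]
    intro hcon
    exact hlen (by omega)
  · rw [if_neg hlen, altLoop_eq_loopC]
    have hl := loop_cnt S b (lT - lS).toNat (PySem.Str.join "" T).toList false
    simp only [Bool.false_eq_true, ite_false] at hl
    rw [← hl]
    have hbase0 : (PySem.Str.join "" S).toList = JA S false := by rw [toList_join_nil]; rfl
    have hbase1 : (PySem.Str.join "" S.reverse).toList = JA S true := by rw [toList_join_nil]; rfl
    have hbase : ∀ q : Bool, (if b ≠ q then PySem.Str.join "" S.reverse else PySem.Str.join "" S).toList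
        = JA S (Bool.xor b q) := by
      intro q
      cases b <;> cases q
      · rw [if_neg (by simp), hbase0]; rfl
      · rw [if_pos (by simp), hbase1]; rfl
      · rw [if_pos (by simp), hbase1]; rfl
      · rw [if_neg (by simp), hbase0]; rfl
    cases hres : loopC (lT - lS).toNat (PySem.Str.join "" T).toList false with
    | none => simp
    | some r =>
      obtain ⟨u, q⟩ := r
      simp only [Option.map_some]
      cases q
      · simp only [Bool.false_eq_true, ite_false]
        simp only [show (String.ofList u = (if b ≠ false then PySem.Str.join "" S.reverse else PySem.Str.join "" S))
              ↔ (u = JA S (Bool.xor b false)) from by rw [ofList_eq_iff, hbase]]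
      · simp only [ite_true]
        simp only [show (String.ofList u
              = String.ofList (if b ≠ true then PySem.Str.join "" S.reverse else PySem.Str.join "" S).toList.reverse)
              ↔ (u = (JA S (Bool.xor b true)).reverse) from by rw [ofList_eq_iff, String.toList_ofList, hbase]]

-- ===== VERDICT (by name: the statement is the Claim_ definition above) =====
theorem check_spec : Claim_equal_check := by
  unfold Claim_equal_check
  intro S T b lS lT _hDom hPre
  unfold Spec_check
  have h0 : 0 ≤ lT - lS := hPre
  have hA : check S T b lS lT = Cnt false (lT - lS).toNat S b (PySem.Str.join "" T).toList :=
    checkAux_eq_cnt T _ S b lS lT (by omega)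
  rw [hA, check_alt_eq_cnt S T b lS lT h0]
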